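-- pv_equiv track=rewrite | github.com/guardkit/guardkit | guardkit/orchestrator/quality_gates/coach_validator.py | _strip_criterion_prefix
-- ===== SOURCE A (Python) =====
-- def _strip_criterion_prefix(text: str) -> str:
--     """
--     Strip common criterion prefixes from text.
--
--     Removes markdown checkbox prefixes (- [ ], - [x ]), bullet points (* ),
--     and numbered prefixes (1. , 2) , 1) ).
--
--     Parameters
--     ----------
--     text : str
--         Text to clean
--
--     Returns
--     -------
--     str
--         Cleaned text without prefix
--     """
--     # Strip leading/trailing whitespace first
--     cleaned = text.strip()
--
--     # Strip markdown checkbox prefixes: "- [ ] ", "- [x] "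
--     if cleaned.startswith("- [ ] "):
--         cleaned = cleaned[6:].strip()
--     elif cleaned.startswith("- [x] "):
--         cleaned = cleaned[6:].strip()
--     # Strip bullet points: "* "
--     elif cleaned.startswith("* "):
--         cleaned = cleaned[2:].strip()
--     # Strip numbered prefixes: "1. ", "2) ", "1) "
--     else:
--         # Check for numbered prefix pattern
--         i = 0
--         while i < len(cleaned) and cleaned[i].isdigit():
--             i += 1
--         if i > 0 and i < len(cleaned):
--             # Found digits, check for ". " or ") "
--             if cleaned[i:i+2] == ". " or cleaned[i:i+2] == ") ":
--                 cleaned = cleaned[i+2:].strip()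
--
--     return cleaned
-- ===== SOURCE B (Python) =====
-- def _strip_criterion_prefix(text: str) -> str:
--     cleaned = text.strip()
--     # Single-pass DFA over the characters recognizing ^(- \[[ x]\] |\* |[0-9]+[.)] ).
--     # On accepting the final space at index i, drop cleaned[:i+1] and strip.
--     state = 0
--     for i, ch in enumerate(cleaned):
--         if state == 0:
--             if ch == '-':
--                 state = 1
--             elif ch == '*':
--                 state = 6
--             elif ch.isdigit():
--                 state = 7
--             else:
--                 break
--         elif state == 1:
--             if ch == ' ':
--                 state = 2
--             else:
--                 break
--         elif state == 2:
--             if ch == '[':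
--                 state = 3
--             else:
--                 break
--         elif state == 3:
--             if ch == ' ' or ch == 'x':
--                 state = 4
--             else:
--                 break
--         elif state == 4:
--             if ch == ']':
--                 state = 5
--             else:
--                 break
--         elif state == 7:
--             if ch.isdigit():
--                 pass
--             elif ch == '.' or ch == ')':
--                 state = 8
--             else:
--                 break
--         else:  # accepting states 5, 6, 8: a space completes the prefix
--             if ch == ' ':
--                 return cleaned[i + 1:].strip()
--             break
--     return cleaned
-- ===== Notes on version B (the rewrite author's own statement) =====
-- stated objective: alternative
-- what changed: Replaces the four-branch startswith/elif chain plus the hand-written digit-scanning while loop with a single left-to-right pass: an explicit finite state machine over the characters that recognizes all four prefix forms at once and reports where the prefix ends.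
import Mathlib
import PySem

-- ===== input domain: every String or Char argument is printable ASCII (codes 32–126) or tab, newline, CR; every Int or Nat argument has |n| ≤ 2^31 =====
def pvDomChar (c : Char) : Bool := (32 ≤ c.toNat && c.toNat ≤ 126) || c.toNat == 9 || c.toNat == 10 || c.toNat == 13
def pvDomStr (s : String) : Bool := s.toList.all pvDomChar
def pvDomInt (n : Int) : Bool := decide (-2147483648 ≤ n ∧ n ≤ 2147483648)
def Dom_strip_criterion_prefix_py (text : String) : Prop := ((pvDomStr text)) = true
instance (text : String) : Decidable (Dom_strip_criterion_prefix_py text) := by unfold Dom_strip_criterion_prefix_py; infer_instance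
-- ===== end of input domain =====

-- B replaces A's four-branch elif chain and hand-written digit-scanning while loop by a single
-- left-to-right pass: an explicit finite state machine recognizing all four prefix forms at once (objective: alternative).


-- ===== PORT A =====
-- the 'while i < len(cleaned) and cleaned[i].isdigit(): i += 1' loop, consuming the scanned chars
def pvScan : List Char → Nat
  | [] => 0
  | c :: rest => if PySem.Chars.isdigit c then pvScan rest + 1 else 0

def strip_criterion_prefix_py (text : String) : String :=
  let cleaned := PySem.Chars.strip text.toList
  if PySem.Chars.startswith cleaned "- [ ] ".toList then
    String.ofList (PySem.Chars.strip (PySem.List.slice cleaned (some 6) none))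
  else if PySem.Chars.startswith cleaned "- [x] ".toList then
    String.ofList (PySem.Chars.strip (PySem.List.slice cleaned (some 6) none))
  else if PySem.Chars.startswith cleaned "* ".toList then
    String.ofList (PySem.Chars.strip (PySem.List.slice cleaned (some 2) none))
  else
    let i := pvScan cleaned
    if 0 < i ∧ i < cleaned.length then
      if PySem.List.slice cleaned (some (i : Int)) (some ((i : Int) + 2)) = ". ".toList ∨
         PySem.List.slice cleaned (some (i : Int)) (some ((i : Int) + 2)) = ") ".toList then
        String.ofList (PySem.Chars.strip (PySem.List.slice cleaned (some ((i : Int) + 2)) none))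
      else String.ofList cleaned
    else String.ofList cleaned

-- ===== PORT B =====
-- the 'for i, ch in enumerate(cleaned)' loop of Source B: one recursive pass carrying the DFA state
-- and the index; returns the index of the accepting space, none where the Python loop falls through
def pvDfa (state : Nat) (i : Nat) : List Char → Option Nat
  | [] => none
  | ch :: rest =>
    if state = 0 then
      if ch = '-' then pvDfa 1 (i+1) rest
      else if ch = '*' then pvDfa 6 (i+1) rest
      else if PySem.Chars.isdigit ch then pvDfa 7 (i+1) rest
      else none
    else if state = 1 then
      if ch = ' ' then pvDfa 2 (i+1) rest else none
    else if state = 2 then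
      if ch = '[' then pvDfa 3 (i+1) rest else none
    else if state = 3 then
      if ch = ' ' ∨ ch = 'x' then pvDfa 4 (i+1) rest else none
    else if state = 4 then
      if ch = ']' then pvDfa 5 (i+1) rest else none
    else if state = 7 then
      if PySem.Chars.isdigit ch then pvDfa 7 (i+1) rest
      else if ch = '.' ∨ ch = ')' then pvDfa 8 (i+1) rest
      else none
    else  -- accepting states 5, 6, 8
      if ch = ' ' then some i else none

def strip_criterion_prefix_py_alt (text : String) : String :=
  let cleaned := PySem.Chars.strip text.toList
  match pvDfa 0 0 cleaned with
  | some i => String.ofList (PySem.Chars.strip (cleaned.drop (i+1)))  -- cleaned[i+1:], nonneg slice = drop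
  | none => String.ofList cleaned

-- ===== PRECONDITION & SPEC =====
def Spec_strip_criterion_prefix_py (text : String) (out : String) : Prop := out = strip_criterion_prefix_py_alt text
instance (text : String) (out : String) : Decidable (Spec_strip_criterion_prefix_py text out) := by unfold Spec_strip_criterion_prefix_py; infer_instance

-- ===== CLAIM (what is proved, stated in full; the proofs are below) =====
def Claim_equal_strip_criterion_prefix_py : Prop := ∀ (text : String), Dom_strip_criterion_prefix_py text → Spec_strip_criterion_prefix_py text (strip_criterion_prefix_py text)

-- ===== LEMMAS AND PROOFS =====

theorem dfa_step0 (i : Nat) (a : Char) (l : List Char) :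
    pvDfa 0 i (a::l) = if a = '-' then pvDfa 1 (i+1) l
      else if a = '*' then pvDfa 6 (i+1) l
      else if PySem.Chars.isdigit a then pvDfa 7 (i+1) l
      else none := by simp [pvDfa]

theorem dfa_step1 (i : Nat) (a : Char) (l : List Char) :
    pvDfa 1 i (a::l) = if a = ' ' then pvDfa 2 (i+1) l else none := by simp [pvDfa]

theorem dfa_step2 (i : Nat) (a : Char) (l : List Char) :
    pvDfa 2 i (a::l) = if a = '[' then pvDfa 3 (i+1) l else none := by simp [pvDfa]

theorem dfa_step3 (i : Nat) (a : Char) (l : List Char) :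
    pvDfa 3 i (a::l) = if a = ' ' ∨ a = 'x' then pvDfa 4 (i+1) l else none := by simp [pvDfa]

theorem dfa_step4 (i : Nat) (a : Char) (l : List Char) :
    pvDfa 4 i (a::l) = if a = ']' then pvDfa 5 (i+1) l else none := by simp [pvDfa]

theorem dfa_step5 (i : Nat) (a : Char) (l : List Char) :
    pvDfa 5 i (a::l) = if a = ' ' then some i else none := by simp [pvDfa]

theorem dfa_step6 (i : Nat) (a : Char) (l : List Char) :
    pvDfa 6 i (a::l) = if a = ' ' then some i else none := by simp [pvDfa]

theorem dfa_step7 (i : Nat) (a : Char) (l : List Char) :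
    pvDfa 7 i (a::l) = if PySem.Chars.isdigit a then pvDfa 7 (i+1) l
      else if a = '.' ∨ a = ')' then pvDfa 8 (i+1) l
      else none := by simp [pvDfa]

theorem dfa_step8 (i : Nat) (a : Char) (l : List Char) :
    pvDfa 8 i (a::l) = if a = ' ' then some i else none := by simp [pvDfa]

theorem dfa_nil (s i : Nat) : pvDfa s i [] = none := rfl

-- success from state 1 forces the exact checkbox shape
theorem pvDfa1_shape (l : List Char) (i j : Nat) (h : pvDfa 1 i l = some j) :
    ∃ m t, l = ' '::'['::m::']'::' '::t ∧ (m = ' ' ∨ m = 'x') := by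
  cases l with
  | nil => simp [dfa_nil] at h
  | cons a1 l1 =>
    rw [dfa_step1] at h
    by_cases h1 : a1 = ' '
    case neg => rw [if_neg h1] at h; exact absurd h (by simp)
    rw [if_pos h1] at h; subst h1
    cases l1 with
    | nil => simp [dfa_nil] at h
    | cons a2 l2 =>
      rw [dfa_step2] at h
      by_cases h2 : a2 = '['
      case neg => rw [if_neg h2] at h; exact absurd h (by simp)
      rw [if_pos h2] at h; subst h2
      cases l2 with
      | nil => simp [dfa_nil] at h
      | cons a3 l3 =>
        rw [dfa_step3] at h
        by_cases h3 : a3 = ' ' ∨ a3 = 'x'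
        case neg => rw [if_neg h3] at h; exact absurd h (by simp)
        rw [if_pos h3] at h
        cases l3 with
        | nil => simp [dfa_nil] at h
        | cons a4 l4 =>
          rw [dfa_step4] at h
          by_cases h4 : a4 = ']'
          case neg => rw [if_neg h4] at h; exact absurd h (by simp)
          rw [if_pos h4] at h; subst h4
          cases l4 with
          | nil => simp [dfa_nil] at h
          | cons a5 l5 =>
            rw [dfa_step5] at h
            by_cases h5 : a5 = ' '
            case neg => rw [if_neg h5] at h; exact absurd h (by simp)
            subst h5
            exact ⟨a3, l5, rfl, h3⟩

-- the digit-run behaviour of the DFA from state 7, characterised via A's scan count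
theorem pvDfa7_char (l : List Char) (i : Nat) :
    pvDfa 7 i l =
      (match l.drop (pvScan l) with
       | c :: d :: _ => if (c = '.' ∨ c = ')') ∧ d = ' ' then some (i + pvScan l + 1) else none
       | _ => none) := by
  induction l generalizing i with
  | nil => simp [dfa_nil, pvScan]
  | cons a l1 ih =>
    by_cases ha : PySem.Chars.isdigit a = true
    · have hs : pvScan (a::l1) = pvScan l1 + 1 := by simp [pvScan, ha]
      rw [dfa_step7, if_pos ha, ih, hs, List.drop_succ_cons]
      cases hdrop : l1.drop (pvScan l1) with
      | nil => rfl
      | cons c r =>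
        cases r with
        | nil => rfl
        | cons d r' =>
          simp only []
          split_ifs with hcond
          · congr 1; omega
          · rfl
    · have ha' : PySem.Chars.isdigit a = false := by simpa using ha
      have hs : pvScan (a::l1) = 0 := by simp [pvScan, ha']
      rw [hs, List.drop_zero, dfa_step7, if_neg (by simp [ha'])]
      by_cases hsep : a = '.' ∨ a = ')'
      · rw [if_pos hsep]
        cases l1 with
        | nil => rfl
        | cons d t =>
          rw [dfa_step8]
          by_cases hd : d = ' ' <;> simp [hd, hsep]
      · rw [if_neg hsep]
        cases l1 with
        | nil => rfl
        | cons d t => simp [hsep]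

theorem pvScan_le (cs : List Char) : pvScan cs ≤ cs.length := by
  induction cs with
  | nil => exact Nat.le_refl 0
  | cons a t ih =>
    by_cases h : PySem.Chars.isdigit a = true
    · simp only [pvScan, h, if_true, List.length_cons]; omega
    · simp [pvScan, h]

-- the whole equivalence on the already-stripped character list
theorem pv_core (cs : List Char) :
    (if PySem.Chars.startswith cs "- [ ] ".toList then
      String.ofList (PySem.Chars.strip (PySem.List.slice cs (some 6) none))
    else if PySem.Chars.startswith cs "- [x] ".toList then
      String.ofList (PySem.Chars.strip (PySem.List.slice cs (some 6) none))
    else if PySem.Chars.startswith cs "* ".toList then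
      String.ofList (PySem.Chars.strip (PySem.List.slice cs (some 2) none))
    else
      if 0 < pvScan cs ∧ pvScan cs < cs.length then
        if PySem.List.slice cs (some (pvScan cs : Int)) (some ((pvScan cs : Int) + 2)) = ". ".toList ∨
           PySem.List.slice cs (some (pvScan cs : Int)) (some ((pvScan cs : Int) + 2)) = ") ".toList then
          String.ofList (PySem.Chars.strip (PySem.List.slice cs (some ((pvScan cs : Int) + 2)) none))
        else String.ofList cs
      else String.ofList cs) =
    (match pvDfa 0 0 cs with
     | some i => String.ofList (PySem.Chars.strip (cs.drop (i+1)))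
     | none => String.ofList cs) := by
  by_cases h1 : PySem.Chars.startswith cs "- [ ] ".toList = true
  · obtain ⟨t, rfl⟩ := (PySem.Chars.startswith_iff cs _).mp h1
    rw [if_pos (by exact h1)]
    rw [show pvDfa 0 0 ("- [ ] ".toList ++ t) = some 5 from rfl]
    rw [PySem.List.slice_from (xs := "- [ ] ".toList ++ t) (a := 6) (by norm_num)]
    rfl
  by_cases h2 : PySem.Chars.startswith cs "- [x] ".toList = true
  · obtain ⟨t, rfl⟩ := (PySem.Chars.startswith_iff cs _).mp h2
    rw [if_neg (by simpa using h1), if_pos (by exact h2)]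
    rw [show pvDfa 0 0 ("- [x] ".toList ++ t) = some 5 from rfl]
    rw [PySem.List.slice_from (xs := "- [x] ".toList ++ t) (a := 6) (by norm_num)]
    rfl
  by_cases h3 : PySem.Chars.startswith cs "* ".toList = true
  · obtain ⟨t, rfl⟩ := (PySem.Chars.startswith_iff cs _).mp h3
    rw [if_neg (by simpa using h1), if_neg (by simpa using h2), if_pos (by exact h3)]
    rw [show pvDfa 0 0 ("* ".toList ++ t) = some 1 from rfl]
    rw [PySem.List.slice_from (xs := "* ".toList ++ t) (a := 2) (by norm_num)]
    rfl
  rw [if_neg (by simpa using h1), if_neg (by simpa using h2), if_neg (by simpa using h3)]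
  cases cs with
  | nil => rfl
  | cons c l =>
    by_cases hc : c = '-'
    · subst hc
      have hscan : pvScan ('-'::l) = 0 := by
        simp [pvScan, show PySem.Chars.isdigit '-' = false from by decide]
      rw [hscan, if_neg (show ¬((0:Nat) < 0 ∧ 0 < ('-'::l).length) from by rintro ⟨h, -⟩; omega)]
      rw [dfa_step0, if_pos rfl]
      have hnone : pvDfa 1 (0+1) l = none := by
        cases hval : pvDfa 1 (0+1) l with
        | none => rfl
        | some j =>
          obtain ⟨m, t, rfl, hm⟩ := pvDfa1_shape l (0+1) j hval
          rcases hm with rfl | rfl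
          · exact absurd ((PySem.Chars.startswith_iff _ _).mpr ⟨t, rfl⟩) (by simpa using h1)
          · exact absurd ((PySem.Chars.startswith_iff _ _).mpr ⟨t, rfl⟩) (by simpa using h2)
      rw [hnone]
    by_cases hs : c = '*'
    · subst hs
      have hscan : pvScan ('*'::l) = 0 := by
        simp [pvScan, show PySem.Chars.isdigit '*' = false from by decide]
      rw [hscan, if_neg (show ¬((0:Nat) < 0 ∧ 0 < ('*'::l).length) from by rintro ⟨h, -⟩; omega)]
      rw [dfa_step0, if_neg (show ¬('*' = '-') from by decide), if_pos rfl]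
      cases l with
      | nil => rfl
      | cons d t =>
        rw [dfa_step6]
        have hd : d ≠ ' ' := by
          intro hd; subst hd
          exact absurd ((PySem.Chars.startswith_iff _ _).mpr ⟨t, rfl⟩) (by simpa using h3)
        rw [if_neg hd]
    by_cases hdig : PySem.Chars.isdigit c = true
    · rw [dfa_step0, if_neg hc, if_neg hs, if_pos hdig, pvDfa7_char]
      have hscan : pvScan (c::l) = pvScan l + 1 := by simp [pvScan, hdig]
      have hdropeq : (c::l).drop (pvScan (c::l)) = l.drop (pvScan l) := by
        rw [hscan, List.drop_succ_cons]
      have hle := pvScan_le l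
      cases hdrop : l.drop (pvScan l) with
      | nil =>
        have hlen : l.length ≤ pvScan l := by
          have := congrArg List.length hdrop
          simp at this; omega
        rw [if_neg (show ¬(0 < pvScan (c::l) ∧ pvScan (c::l) < (c::l).length) from by
          rw [hscan]; simp only [List.length_cons]; omega)]
      | cons c1 r =>
        have hlt : pvScan l < l.length := by
          have := congrArg List.length hdrop
          simp at this; omega
        rw [if_pos (show 0 < pvScan (c::l) ∧ pvScan (c::l) < (c::l).length from by
          rw [hscan]; simp only [List.length_cons]; omega)]
        have hslice2 : PySem.List.slice (c::l) (some (pvScan (c::l) : Int)) (some ((pvScan (c::l) : Int) + 2)) =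
            (c1 :: r).take 2 := by
          rw [show ((pvScan (c::l) : Int) + 2) = ((pvScan (c::l) + 2 : Nat) : Int) from by push_cast; ring,
            PySem.List.slice_natCast, show pvScan (c::l) + 2 - pvScan (c::l) = 2 from by omega,
            hdropeq, hdrop]
        have hslice3 : PySem.List.slice (c::l) (some ((pvScan (c::l) : Int) + 2)) none =
            (c1 :: r).drop 2 := by
          rw [show ((pvScan (c::l) : Int) + 2) = ((pvScan (c::l) + 2 : Nat) : Int) from by push_cast; ring,
            PySem.List.slice_from_natCast, show pvScan (c::l) + 2 = (pvScan (c::l) + 1) + 1 from rfl]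
          rw [← List.drop_drop, ← List.drop_drop, show (c::l).drop (pvScan (c::l)) = c1 :: r from hdropeq.trans hdrop]
          rfl
        rw [hslice2, hslice3,
          show ". ".toList = ['.', ' '] from rfl, show ") ".toList = [')', ' '] from rfl]
        cases r with
        | nil =>
          rw [if_neg (show ¬((c1 :: ([]:List Char)).take 2 = ['.', ' '] ∨ (c1 :: ([]:List Char)).take 2 = [')', ' ']) from by
            rintro (h | h) <;> simpa using congrArg List.length h)]
        | cons d r' =>
          have htake : (c1 :: d :: r').take 2 = [c1, d] := rfl
          rw [htake]
          have hiff : ([c1, d] = ['.', ' '] ∨ [c1, d] = [')', ' ']) ↔ ((c1 = '.' ∨ c1 = ')') ∧ d = ' ') := by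
            simp only [List.cons.injEq, and_true]
            tauto
          have h9 : (c::l).drop (0 + 1 + pvScan l + 1 + 1) = (c1 :: d :: r').drop 2 := by
            rw [show 0 + 1 + pvScan l + 1 + 1 = (pvScan l + 2) + 1 from by omega, List.drop_succ_cons,
              ← List.drop_drop, hdrop]
          by_cases hcond : (c1 = '.' ∨ c1 = ')') ∧ d = ' '
          · rw [if_pos (hiff.mpr hcond)]
            show String.ofList (PySem.Chars.strip ((c1 :: d :: r').drop 2)) =
              (match (if (c1 = '.' ∨ c1 = ')') ∧ d = ' ' then some (0 + 1 + pvScan l + 1) else none : Option Nat) with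
               | some i => String.ofList (PySem.Chars.strip ((c :: l).drop (i + 1)))
               | none => String.ofList (c :: l))
            rw [if_pos hcond]
            show String.ofList (PySem.Chars.strip ((c1 :: d :: r').drop 2)) =
              String.ofList (PySem.Chars.strip ((c :: l).drop (0 + 1 + pvScan l + 1 + 1)))
            rw [h9]
          · rw [if_neg (fun hh => hcond (hiff.mp hh))]
            show String.ofList (c :: l) =
              (match (if (c1 = '.' ∨ c1 = ')') ∧ d = ' ' then some (0 + 1 + pvScan l + 1) else none : Option Nat) with
               | some i => String.ofList (PySem.Chars.strip ((c :: l).drop (i + 1)))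
               | none => String.ofList (c :: l))
            rw [if_neg hcond]
    · rw [dfa_step0, if_neg hc, if_neg hs, if_neg hdig]
      have hscan : pvScan (c::l) = 0 := by simp [pvScan, hdig]
      rw [hscan, if_neg (show ¬((0:Nat) < 0 ∧ 0 < (c::l).length) from by rintro ⟨h, -⟩; omega)]

-- ===== VERDICT (by name: the statement is the Claim_ definition above) =====
theorem strip_criterion_prefix_py_spec : Claim_equal_strip_criterion_prefix_py := by
  intro text _
  unfold Spec_strip_criterion_prefix_py strip_criterion_prefix_py strip_criterion_prefix_py_alt
  exact pv_core (PySem.Chars.strip text.toList)
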